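-- pv_equiv track=rewrite | github.com/C-huck/ELAN-overlap | overlap_v2.py | overlapping_annotations
-- ===== SOURCE A (Python) =====
-- from collections import Counter
--
-- def overlapping_annotations(hits,matrix):
--     overlapped_annots = []
--     for j in hits:
--         per_tier = [str(x[j]) for x in matrix]
--         overlapped_annots.append("|".join(per_tier))
--     if len(overlapped_annots) == 0:
--         return None
--     else:
--         return Counter(overlapped_annots)
-- ===== SOURCE B (Python) =====
-- from collections import Counter
--
-- def overlapping_annotations(hits, matrix):
--     if not hits:
--         return None
--     keys = list(dict.fromkeys(hits))          # distinct column indices, first-occurrence order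
--     parts = {j: [] for j in keys}
--     for row in matrix:                        # single pass over rows
--         for j in keys:
--             parts[j].append(str(row[j]))
--     joined = {j: "|".join(parts[j]) for j in keys}
--     return Counter(joined[j] for j in hits)   # duplicate hits count via dict lookup
-- ===== Notes on version B (the rewrite author's own statement) =====
-- stated objective: alternative
-- what changed: B deduplicates the hit indices, builds each distinct column's joined string exactly once with a single pass over the matrix rows into a dict of accumulators, and then counts the hits by dict lookup, instead of A's per-hit full matrix scan; duplicate hits are never recomputed.
import Mathlib
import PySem

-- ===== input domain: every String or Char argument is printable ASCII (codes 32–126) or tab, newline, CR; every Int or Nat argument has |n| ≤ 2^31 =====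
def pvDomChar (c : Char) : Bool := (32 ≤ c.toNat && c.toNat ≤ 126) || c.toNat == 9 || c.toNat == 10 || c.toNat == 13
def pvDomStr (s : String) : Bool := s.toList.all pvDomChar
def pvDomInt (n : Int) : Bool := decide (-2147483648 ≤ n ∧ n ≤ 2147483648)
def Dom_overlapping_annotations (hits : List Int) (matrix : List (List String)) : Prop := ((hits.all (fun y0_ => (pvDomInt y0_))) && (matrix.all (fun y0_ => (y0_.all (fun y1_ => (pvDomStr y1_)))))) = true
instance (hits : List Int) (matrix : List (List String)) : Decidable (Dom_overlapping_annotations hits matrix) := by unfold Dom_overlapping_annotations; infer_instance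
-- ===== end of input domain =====

-- B deduplicates the hit indices, builds each distinct column's joined string once in a
-- single pass over the rows (dict of accumulators), then counts hits by dict lookup;
-- alternative decomposition, same result.

-- ===== PORT A =====
-- str(x[j]): x[j] with Python index semantics; under Pre_ the index is always in range.
def pvGetA (row : List String) (j : Int) : String := (PySem.List.pyGet? row j).getD ""

def overlapping_annotations (hits : List Int) (matrix : List (List String)) : Option (List (String × Int)) :=
  let overlapped_annots : List String :=
    hits.foldl (fun acc j =>
      let per_tier := matrix.map (fun x => pvGetA x j)
      acc ++ [PySem.Str.join "|" per_tier]) []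
  if overlapped_annots.length = 0 then none
  else some (PySem.Dict.counter overlapped_annots).items

-- ===== PORT B =====
def overlapping_annotations_alt (hits : List Int) (matrix : List (List String)) : Option (List (String × Int)) :=
  if hits.isEmpty then none
  else
    let keys : List Int := PySem.List.dedup hits
    let parts0 : PySem.Dict Int (List String) :=
      keys.foldl (fun d j => d.insert j []) PySem.Dict.empty
    let parts : PySem.Dict Int (List String) :=
      matrix.foldl (fun d row =>
        keys.foldl (fun d' j => d'.modify j [] (fun v => v ++ [pvGetA row j])) d) parts0
    let joined : PySem.Dict Int String :=
      keys.foldl (fun d j => d.insert j (PySem.Str.join "|" (parts.getD j []))) PySem.Dict.empty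
    some (PySem.Dict.counter (hits.map (fun j => joined.getD j ""))).items

-- ===== PRECONDITION & SPEC =====
-- Pre_ excludes exactly the inputs where some hit index is out of range for some row: Python A raises IndexError there.
def Pre_overlapping_annotations (hits : List Int) (matrix : List (List String)) : Prop :=
  ∀ j ∈ hits, ∀ row ∈ matrix, PySem.Raise.InRange row.length j
instance (hits : List Int) (matrix : List (List String)) : Decidable (Pre_overlapping_annotations hits matrix) := by unfold Pre_overlapping_annotations; infer_instance

def pvWitness_overlapping_annotations : List Int × List (List String) := ([0, -1, 0], [["a", "b"], ["c", "d"]])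

def Spec_overlapping_annotations (hits : List Int) (matrix : List (List String)) (out : Option (List (String × Int))) : Prop := out = overlapping_annotations_alt hits matrix
instance (hits : List Int) (matrix : List (List String)) (out : Option (List (String × Int))) : Decidable (Spec_overlapping_annotations hits matrix out) := by unfold Spec_overlapping_annotations; infer_instance

-- ===== CLAIM (what is proved, stated in full; the proofs are below) =====
def Claim_equal_overlapping_annotations : Prop := ∀ (hits : List Int) (matrix : List (List String)), Dom_overlapping_annotations hits matrix → Pre_overlapping_annotations hits matrix → Spec_overlapping_annotations hits matrix (overlapping_annotations hits matrix)

-- ===== LEMMAS AND PROOFS =====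

-- getD through an insert-fold whose value depends only on the key.
theorem pv_getD_foldl_insert {ν : Type} (l : List Int) (g : Int → ν) (d : PySem.Dict Int ν) (k : Int) (d0 : ν) :
    (l.foldl (fun d j => d.insert j (g j)) d).getD k d0
      = if k ∈ l then g k else d.getD k d0 := by
  induction l generalizing d with
  | nil => simp
  | cons j t ih =>
    simp only [List.foldl_cons, ih, List.mem_cons]
    by_cases ht : k ∈ t
    · simp [ht]
    · by_cases hj : k = j <;> simp [ht, hj, PySem.Dict.getD_insert]

-- one row: the inner modify-fold appends this row's entry to each key's accumulator.
theorem pv_row_step (keys : List Int) (hnd : keys.Nodup) (row : List String)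
    (d : PySem.Dict Int (List String)) (k : Int) :
    (keys.foldl (fun d' j => d'.modify j [] (fun v => v ++ [pvGetA row j])) d).getD k []
      = if k ∈ keys then d.getD k [] ++ [pvGetA row k] else d.getD k [] := by
  induction keys generalizing d with
  | nil => simp
  | cons j t ih =>
    have hj_t : j ∉ t := (List.nodup_cons.mp hnd).1
    have hnd' : t.Nodup := (List.nodup_cons.mp hnd).2
    simp only [List.foldl_cons, ih hnd', List.mem_cons]
    by_cases ht : k ∈ t
    · have hkj : k ≠ j := fun h => hj_t (h ▸ ht)
      simp [ht, hkj, PySem.Dict.getD_modify]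
    · by_cases hkj : k = j
      · subst hkj; simp [ht, PySem.Dict.getD_modify]
      · simp [ht, hkj, PySem.Dict.getD_modify]

-- whole matrix pass: each key's accumulator collects its column.
theorem pv_matrix_pass (keys : List Int) (hnd : keys.Nodup) (matrix : List (List String))
    (d : PySem.Dict Int (List String)) (k : Int) (hk : k ∈ keys) :
    (matrix.foldl (fun d row =>
        keys.foldl (fun d' j => d'.modify j [] (fun v => v ++ [pvGetA row j])) d) d).getD k []
      = d.getD k [] ++ matrix.map (fun row => pvGetA row k) := by
  induction matrix generalizing d with
  | nil => simp
  | cons row rest ih =>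
    simp only [List.foldl_cons, ih, pv_row_step keys hnd row d k, hk, if_pos, List.map_cons,
      List.append_assoc, List.singleton_append]

theorem overlapping_annotations_spec : Claim_equal_overlapping_annotations := by
  intro hits matrix _ _
  unfold Spec_overlapping_annotations overlapping_annotations overlapping_annotations_alt
  have hA : hits.foldl (fun acc j => acc ++ [PySem.Str.join "|" (matrix.map (fun x => pvGetA x j))]) []
      = hits.map (fun j => PySem.Str.join "|" (matrix.map (fun x => pvGetA x j))) := by
    simpa using PySem.List.foldl_append_singleton_eq_map
      (f := fun j => PySem.Str.join "|" (matrix.map (fun x => pvGetA x j))) (l := hits) (acc := [])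
  simp only [hA, List.length_map]
  cases hits with
  | nil => simp
  | cons h t =>
    simp only [List.length_cons, List.isEmpty_cons, Nat.succ_ne_zero,
      Bool.false_eq_true, if_false]
    refine congrArg (fun l => some (PySem.Dict.counter l).items) ?_
    apply List.map_congr_left
    intro j hj
    have hkeys : j ∈ PySem.List.dedup (h :: t) := by
      rw [PySem.List.dedup_eq_ofList, PySem.Set.mem_ofList]; exact hj
    have hnd : (PySem.List.dedup (h :: t)).Nodup := PySem.List.nodup_dedup _
    rw [pv_getD_foldl_insert, if_pos hkeys,
      pv_matrix_pass _ hnd matrix _ j hkeys,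
      pv_getD_foldl_insert, if_pos hkeys]
    simp
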